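-- pv_equiv track=rewrite | github.com/devjohnnydev/-SIMDCCONR01 | reports/engine_text.py | _nr12_achado
-- ===== SOURCE A (Python) =====
-- def _nr12_achado(items):
--     """Gera achado NR-12."""
--     criticos = [i for i in items if i['classificacao_key'] == 'critico']
--     if criticos:
--         return 'Percepção de risco e/ou falha comportamental em segurança de máquinas.'
--     atencao = [i for i in items if i['classificacao_key'] == 'atencao']
--     if atencao:
--         return 'Percepção de risco moderada em segurança de máquinas e equipamentos.'
--     return 'Dispositivos de segurança percebidos como adequados e funcionais.'
-- ===== SOURCE B (Python) =====
-- def _nr12_achado(items):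
--     """Gera achado NR-12."""
--     has_critico = False
--     has_atencao = False
--     for i in items:
--         k = i['classificacao_key']
--         if k == 'critico':
--             has_critico = True
--         if k == 'atencao':
--             has_atencao = True
--     if has_critico:
--         return 'Percepção de risco e/ou falha comportamental em segurança de máquinas.'
--     if has_atencao:
--         return 'Percepção de risco moderada em segurança de máquinas e equipamentos.'
--     return 'Dispositivos de segurança percebidos como adequados e funcionais.'
-- ===== Notes on version B (the rewrite author's own statement) =====
-- stated objective: simpler
-- what changed: Replaces the two list comprehensions that each build a filtered list with one single pass maintaining two boolean flags, accessing each item's key exactly once.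
import Mathlib
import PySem

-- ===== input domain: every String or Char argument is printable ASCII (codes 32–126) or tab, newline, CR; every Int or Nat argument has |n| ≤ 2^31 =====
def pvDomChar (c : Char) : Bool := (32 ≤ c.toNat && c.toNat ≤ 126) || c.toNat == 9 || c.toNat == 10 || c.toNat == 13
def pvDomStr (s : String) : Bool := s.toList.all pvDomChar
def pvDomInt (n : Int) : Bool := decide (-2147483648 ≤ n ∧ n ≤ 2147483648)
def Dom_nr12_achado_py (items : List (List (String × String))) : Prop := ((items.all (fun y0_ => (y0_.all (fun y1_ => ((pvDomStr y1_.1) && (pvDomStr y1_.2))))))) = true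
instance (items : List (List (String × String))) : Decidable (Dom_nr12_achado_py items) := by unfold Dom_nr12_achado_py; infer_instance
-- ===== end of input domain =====

-- ===== PORT A =====
-- B replaces A's two filtering comprehensions by one single pass with two boolean flags (simpler; same exception behaviour).
-- dict lookup under the type convention: first match in the association list (exact; none = KeyError)
def keyGet? (d : List (String × String)) (k : String) : Option String :=
  match d with
  | [] => none
  | (a, b) :: rest => if a == k then some b else keyGet? rest k

def nr12_achado_py (items : List (List (String × String))) : String :=
  let criticos := items.filter (fun i => keyGet? i "classificacao_key" == some "critico")
  if !criticos.isEmpty then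
    "Percepção de risco e/ou falha comportamental em segurança de máquinas."
  else
    let atencao := items.filter (fun i => keyGet? i "classificacao_key" == some "atencao")
    if !atencao.isEmpty then
      "Percepção de risco moderada em segurança de máquinas e equipamentos."
    else
      "Dispositivos de segurança percebidos como adequados e funcionais."

-- ===== PORT B =====
def nr12_achado_py_alt (items : List (List (String × String))) : String :=
  let st := items.foldl
    (fun (st : Bool × Bool) i =>
      let k := keyGet? i "classificacao_key"
      let st1 := if k == some "critico" then (true, st.2) else st
      if k == some "atencao" then (st1.1, true) else st1)
    (false, false)
  if st.1 then
    "Percepção de risco e/ou falha comportamental em segurança de máquinas."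
  else if st.2 then
    "Percepção de risco moderada em segurança de máquinas e equipamentos."
  else
    "Dispositivos de segurança percebidos como adequados e funcionais."

-- ===== PRECONDITION & SPEC =====
-- Pre_ excludes exactly the items missing the key 'classificacao_key', on which Python A raises KeyError.
def Pre_nr12_achado_py (items : List (List (String × String))) : Prop :=
  ∀ i ∈ items, ∃ p ∈ i, p.1 = "classificacao_key"

instance (items : List (List (String × String))) : Decidable (Pre_nr12_achado_py items) := by
  unfold Pre_nr12_achado_py; infer_instance

def pvWitness_nr12_achado_py : (List (List (String × String))) :=
  [[("classificacao_key", "critico")], [("classificacao_key", "ok")]]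

def Spec_nr12_achado_py (items : List (List (String × String))) (out : String) : Prop := out = nr12_achado_py_alt items
instance (items : List (List (String × String))) (out : String) : Decidable (Spec_nr12_achado_py items out) := by unfold Spec_nr12_achado_py; infer_instance

-- ===== CLAIM (what is proved, stated in full; the proofs are below) =====
def Claim_equal_nr12_achado_py : Prop := ∀ (items : List (List (String × String))), Dom_nr12_achado_py items → Pre_nr12_achado_py items → Spec_nr12_achado_py items (nr12_achado_py items)

-- ===== LEMMAS AND PROOFS =====
def pvStep (st : Bool × Bool) (i : List (String × String)) : Bool × Bool :=
  let k := keyGet? i "classificacao_key"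
  let st1 := if k == some "critico" then (true, st.2) else st
  if k == some "atencao" then (st1.1, true) else st1

theorem pvFold_eq (items : List (List (String × String))) (st : Bool × Bool) :
    items.foldl pvStep st =
      (st.1 || items.any (fun i => keyGet? i "classificacao_key" == some "critico"),
       st.2 || items.any (fun i => keyGet? i "classificacao_key" == some "atencao")) := by
  induction items generalizing st with
  | nil => simp
  | cons hd tl ih =>
    simp only [List.foldl_cons, List.any_cons, ih]
    simp only [pvStep]
    by_cases hc : keyGet? hd "classificacao_key" == some "critico" <;>
      by_cases ha : keyGet? hd "classificacao_key" == some "atencao" <;>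
      simp [hc, ha]

theorem pvFilter_any {α : Type} (p : α → Bool) (xs : List α) :
    (!(xs.filter p).isEmpty) = xs.any p := by
  induction xs with
  | nil => simp
  | cons hd tl ih =>
    by_cases h : p hd <;> simp [h, ih]

-- ===== VERDICT (by name: the statement is the Claim_ definition above) =====
theorem nr12_achado_py_spec : Claim_equal_nr12_achado_py := by
  intro items _ _
  unfold Spec_nr12_achado_py nr12_achado_py nr12_achado_py_alt
  have hf : items.foldl
      (fun (st : Bool × Bool) i =>
        let k := keyGet? i "classificacao_key"
        let st1 := if k == some "critico" then (true, st.2) else st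
        if k == some "atencao" then (st1.1, true) else st1)
      (false, false) = items.foldl pvStep (false, false) := rfl
  rw [hf, pvFold_eq]
  simp only [Bool.false_or]
  rw [pvFilter_any, pvFilter_any]
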